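-- pv_equiv track=rewrite | github.com/balibabu/Timeline | 2023/06_June/GeneticDrift/level1.py | getOPList
-- ===== SOURCE A (Python) =====
-- def getOPList(length,permu):
--     opList=[]
--     for i in range(length):
--         for j in range(i+1,length):
--             x,y=permu[i],permu[j]
--             if (x<=0<=y or y<=0<=x) and not(x>=0 and y>=0):
--                 if abs(abs(x)-abs(y))==1:
--                     opList.append((permu[i],permu[j]))
--     return opList
-- ===== SOURCE B (Python) =====
-- def getOPList(length, permu):
--     pos = {}
--     for j in range(length):
--         pos.setdefault(permu[j], []).append(j)
--     out = []
--     for i in range(length):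
--         x = permu[i]
--         js = []
--         for y in (1 - x, -1 - x):
--             if (x < 0 <= y) or (y < 0 <= x):
--                 js.extend(j for j in pos.get(y, []) if j > i)
--         js.sort()
--         out.extend([(x, permu[j]) for j in js])
--     return out
-- ===== Notes on version B (the rewrite author's own statement) =====
-- stated objective: faster
-- what changed: B replaces A's nested all-pairs index scan by one dict mapping each value to its (ascending) positions: since a partner of x must carry value 1-x or -1-x with the opposite sign, each element needs only two dict lookups instead of a scan of the rest of the list.
-- outside the precondition, e.g. on getOPList(1, []): A returns [], B raises IndexError
import Mathlib
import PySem

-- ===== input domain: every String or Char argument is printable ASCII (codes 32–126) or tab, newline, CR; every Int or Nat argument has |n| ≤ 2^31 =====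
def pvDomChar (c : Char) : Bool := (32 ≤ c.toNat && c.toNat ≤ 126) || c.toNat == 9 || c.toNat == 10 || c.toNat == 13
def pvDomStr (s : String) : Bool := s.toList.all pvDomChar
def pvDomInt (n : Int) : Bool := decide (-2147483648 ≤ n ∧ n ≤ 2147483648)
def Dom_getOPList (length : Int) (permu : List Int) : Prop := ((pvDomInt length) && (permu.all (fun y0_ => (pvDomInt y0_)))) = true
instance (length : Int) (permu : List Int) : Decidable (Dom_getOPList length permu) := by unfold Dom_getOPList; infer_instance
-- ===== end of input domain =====

-- B replaces A's quadratic all-pairs scan by a dict indexing each value's positions: a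
-- partner of x must carry one of the two values 1-x and -1-x with the opposite sign, so
-- each element needs only two dict lookups instead of a scan of the rest of the list.
-- (A returns tuples; both ports render a pair as a 2-element list.)

-- ===== PORT A =====
def getOPList (length : Int) (permu : List Int) : List (List Int) :=
  (PySem.List.pyRange 0 length 1).foldl (fun opList i =>
    (PySem.List.pyRange (i + 1) length 1).foldl (fun opList j =>
      let x := PySem.List.pyGetD permu i 0
      let y := PySem.List.pyGetD permu j 0
      if ((x ≤ 0 ∧ 0 ≤ y) ∨ (y ≤ 0 ∧ 0 ≤ x)) ∧ ¬(x ≥ 0 ∧ y ≥ 0) then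
        if |(|x| - |y|)| = 1 then opList ++ [[x, y]] else opList
      else opList) opList) []


-- ===== PORT B =====
def getOPList_alt (length : Int) (permu : List Int) : List (List Int) :=
  let pos : PySem.Dict Int (List Int) :=
    (PySem.List.pyRange 0 length 1).foldl
      (fun d j => d.modify (PySem.List.pyGetD permu j 0) [] (fun l => l ++ [j]))
      PySem.Dict.empty
  (PySem.List.pyRange 0 length 1).foldl (fun out i =>
    out ++ (PySem.List.sorted
      ([1 - PySem.List.pyGetD permu i 0, -1 - PySem.List.pyGetD permu i 0].foldl (fun js y =>
        if (PySem.List.pyGetD permu i 0 < 0 ∧ 0 ≤ y) ∨ (y < 0 ∧ 0 ≤ PySem.List.pyGetD permu i 0) then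
          js ++ (pos.getD y []).filter (fun j => decide (i < j))
        else js) [])
      (fun j => j) false).map
      (fun j => [PySem.List.pyGetD permu i 0, PySem.List.pyGetD permu j 0])) []


-- ===== PRECONDITION & SPEC =====
-- Pre_ excludes exactly the inputs with len(permu) < length: there A raises IndexError as
-- soon as two indices exist (length ≥ 2), and in the one remaining corner (length = 1,
-- permu = []) A returns [] while B, which reads permu[j] for j in range(length) up front,
-- raises. Negative length (empty range, result []) is inside Pre_.
def Pre_getOPList (length : Int) (permu : List Int) : Prop :=
  length ≤ permu.length ∨ length ≤ 0
instance (length : Int) (permu : List Int) : Decidable (Pre_getOPList length permu) := by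
  unfold Pre_getOPList; infer_instance

def pvWitness_getOPList : Int × List Int := (4, [-2, 1, 3, -4])

def Spec_getOPList (length : Int) (permu : List Int) (out : List (List Int)) : Prop := out = getOPList_alt length permu
instance (length : Int) (permu : List Int) (out : List (List Int)) : Decidable (Spec_getOPList length permu out) := by unfold Spec_getOPList; infer_instance

-- ===== CLAIM (what is proved, stated in full; the proofs are below) =====
def Claim_equal_getOPList : Prop := ∀ (length : Int) (permu : List Int), Dom_getOPList length permu → Pre_getOPList length permu → Spec_getOPList length permu (getOPList length permu)

-- ===== LEMMAS AND PROOFS =====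

abbrev pvCond (x v : Int) : Prop :=
  (((x ≤ 0 ∧ 0 ≤ v) ∨ (v ≤ 0 ∧ 0 ≤ x)) ∧ ¬(x ≥ 0 ∧ v ≥ 0)) ∧ |(|x| - |v|)| = 1

abbrev pvGuard (x v : Int) : Prop := (x < 0 ∧ 0 ≤ v) ∨ (v < 0 ∧ 0 ≤ x)

lemma pvCond_iff (x v : Int) :
    pvCond x v ↔ ((pvGuard x (1 - x) ∧ v = 1 - x) ∨ (pvGuard x (-1 - x) ∧ v = -1 - x)) := by
  unfold pvCond pvGuard
  rw [abs_eq (by norm_num : (0:ℤ) ≤ 1)]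
  rcases le_or_gt 0 x with hx | hx <;> rcases le_or_gt 0 v with hv | hv
  · rw [abs_of_nonneg hx, abs_of_nonneg hv]; omega
  · rw [abs_of_nonneg hx, abs_of_neg hv]; omega
  · rw [abs_of_neg hx, abs_of_nonneg hv]; omega
  · rw [abs_of_neg hx, abs_of_neg hv]; omega

lemma pvPos_getD (l : List Int) (g : Int → Int) (d : PySem.Dict Int (List Int)) (y : Int) :
    (l.foldl (fun d j => d.modify (g j) [] (fun s => s ++ [j])) d).getD y []
      = d.getD y [] ++ l.filter (fun j => decide (g j = y)) := by
  induction l generalizing d with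
  | nil => simp
  | cons j t ih =>
    simp only [List.foldl_cons, List.filter_cons]
    by_cases h : g j = y
    · rw [ih]; simp [h, PySem.Dict.getD_modify_self]
    · rw [ih, PySem.Dict.getD_modify_of_ne]
      · simp [h]
      · exact fun hc => h hc.symm

lemma pvFilter_or_perm {α : Type} (l : List α) (p q : α → Bool)
    (h : ∀ a ∈ l, ¬(p a = true ∧ q a = true)) :
    (l.filter (fun a => p a || q a)).Perm (l.filter p ++ l.filter q) := by
  induction l with
  | nil => simp
  | cons a t ih =>
    have ht : ∀ b ∈ t, ¬(p b = true ∧ q b = true) := fun b hb => h b (List.mem_cons_of_mem a hb)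
    by_cases hp : p a = true
    · have hq : ¬ q a = true := fun hq => h a List.mem_cons_self ⟨hp, hq⟩
      simp only [List.filter_cons, hp, hq, Bool.true_or, if_true, List.cons_append,
        Bool.false_eq_true, if_false]
      exact (ih ht).cons a
    · by_cases hq : q a = true
      · simp only [List.filter_cons, hp, hq, Bool.false_or, if_true, Bool.false_eq_true, if_false]
        exact ((ih ht).cons a).trans List.perm_middle.symm
      · simp only [List.filter_cons, hp, hq, Bool.false_or, Bool.false_eq_true, if_false]
        exact ih ht

set_option maxHeartbeats 1600000 in
theorem pvMain (length : Int) (permu : List Int) :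
    getOPList length permu = getOPList_alt length permu := by
  -- A as a flat list of filtered inner ranges
  have hA : getOPList length permu
      = (PySem.List.pyRange 0 length 1).flatMap (fun i =>
          ((PySem.List.pyRange (i + 1) length 1).filter
            (fun j => decide (pvCond (PySem.List.pyGetD permu i 0) (PySem.List.pyGetD permu j 0)))).map
          (fun j => [PySem.List.pyGetD permu i 0, PySem.List.pyGetD permu j 0])) := by
    unfold getOPList
    have hin : ∀ (acc : List (List Int)), ∀ i ∈ PySem.List.pyRange 0 length 1,
        (PySem.List.pyRange (i + 1) length 1).foldl (fun opList j =>
          let x := PySem.List.pyGetD permu i 0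
          let y := PySem.List.pyGetD permu j 0
          if ((x ≤ 0 ∧ 0 ≤ y) ∨ (y ≤ 0 ∧ 0 ≤ x)) ∧ ¬(x ≥ 0 ∧ y ≥ 0) then
            if |(|x| - |y|)| = 1 then opList ++ [[x, y]] else opList
          else opList) acc
        = acc ++ ((PySem.List.pyRange (i + 1) length 1).filter
            (fun j => decide (pvCond (PySem.List.pyGetD permu i 0) (PySem.List.pyGetD permu j 0)))).map
          (fun j => [PySem.List.pyGetD permu i 0, PySem.List.pyGetD permu j 0]) := by
      intro acc i _
      have hbody : ∀ (acc : List (List Int)), ∀ j ∈ PySem.List.pyRange (i + 1) length 1,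
          (let x := PySem.List.pyGetD permu i 0
           let y := PySem.List.pyGetD permu j 0
           if ((x ≤ 0 ∧ 0 ≤ y) ∨ (y ≤ 0 ∧ 0 ≤ x)) ∧ ¬(x ≥ 0 ∧ y ≥ 0) then
             if |(|x| - |y|)| = 1 then acc ++ [[x, y]] else acc
           else acc)
          = (if pvCond (PySem.List.pyGetD permu i 0) (PySem.List.pyGetD permu j 0) then
              acc ++ [[PySem.List.pyGetD permu i 0, PySem.List.pyGetD permu j 0]] else acc) := by
        intro acc j _
        by_cases h1 : ((PySem.List.pyGetD permu i 0 ≤ 0 ∧ 0 ≤ PySem.List.pyGetD permu j 0) ∨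
            (PySem.List.pyGetD permu j 0 ≤ 0 ∧ 0 ≤ PySem.List.pyGetD permu i 0)) ∧
            ¬(PySem.List.pyGetD permu i 0 ≥ 0 ∧ PySem.List.pyGetD permu j 0 ≥ 0) <;>
          by_cases h2 : |(|PySem.List.pyGetD permu i 0| - |PySem.List.pyGetD permu j 0|)| = 1 <;>
          simp [pvCond, h1, h2]
      rw [PySem.List.foldl_congr_mem _ _ _ _ hbody]
      exact PySem.List.foldl_append_ite _ _ _ _
    rw [PySem.List.foldl_congr_mem _ _ _ _ hin, PySem.List.foldl_append_eq_flatMap]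
    simp
  -- B as a flat list as well
  have hB : getOPList_alt length permu
      = (PySem.List.pyRange 0 length 1).flatMap (fun i =>
          (PySem.List.sorted
            ([1 - PySem.List.pyGetD permu i 0, -1 - PySem.List.pyGetD permu i 0].foldl (fun js y =>
              if (PySem.List.pyGetD permu i 0 < 0 ∧ 0 ≤ y) ∨ (y < 0 ∧ 0 ≤ PySem.List.pyGetD permu i 0) then
                js ++ (((PySem.List.pyRange 0 length 1).foldl
                    (fun d j => d.modify (PySem.List.pyGetD permu j 0) [] (fun l => l ++ [j]))
                    PySem.Dict.empty).getD y []).filter (fun j => decide (i < j))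
              else js) [])
            (fun j => j) false).map
          (fun j => [PySem.List.pyGetD permu i 0, PySem.List.pyGetD permu j 0])) := by
    unfold getOPList_alt
    rw [PySem.List.foldl_append_eq_flatMap]
    simp
  rw [hA, hB]
  -- the dict of positions, looked up
  have hpos : ∀ y : Int,
      (((PySem.List.pyRange 0 length 1).foldl
          (fun d j => d.modify (PySem.List.pyGetD permu j 0) [] (fun l => l ++ [j]))
          PySem.Dict.empty).getD y [])
      = (PySem.List.pyRange 0 length 1).filter (fun j => decide (PySem.List.pyGetD permu j 0 = y)) := by
    intro y
    rw [pvPos_getD]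
    simp
  apply List.flatMap_congr
  intro i hi
  rw [PySem.List.mem_pyRange_one] at hi
  -- the filtered lookup keeps exactly the later positions of value y
  have hcut : ∀ y : Int,
      ((PySem.List.pyRange 0 length 1).filter (fun j => decide (PySem.List.pyGetD permu j 0 = y))).filter
        (fun j => decide (i < j))
      = (PySem.List.pyRange (i + 1) length 1).filter (fun j => decide (PySem.List.pyGetD permu j 0 = y)) := by
    intro y
    rw [List.filter_filter, PySem.List.pyRange_one_append 0 (i + 1) length (by omega) (by omega),
      List.filter_append]
    have h1 : (PySem.List.pyRange 0 (i + 1) 1).filter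
        (fun j => decide (i < j) && decide (PySem.List.pyGetD permu j 0 = y)) = [] := by
      refine List.filter_eq_nil_iff.mpr (fun j hj => ?_)
      rw [PySem.List.mem_pyRange_one] at hj
      simp only [Bool.and_eq_true, decide_eq_true_eq]
      rintro ⟨h, -⟩
      omega
    have h2 : (PySem.List.pyRange (i + 1) length 1).filter
        (fun j => decide (i < j) && decide (PySem.List.pyGetD permu j 0 = y))
        = (PySem.List.pyRange (i + 1) length 1).filter
            (fun j => decide (PySem.List.pyGetD permu j 0 = y)) := by
      refine List.filter_congr (fun j hj => ?_)
      rw [PySem.List.mem_pyRange_one] at hj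
      have : i < j := by omega
      simp [this]
    rw [h1, h2, List.nil_append]
  -- core: the sorted merged dict lookups are exactly A's filtered inner range
  suffices hs : PySem.List.sorted
      ([1 - PySem.List.pyGetD permu i 0, -1 - PySem.List.pyGetD permu i 0].foldl (fun js y =>
        if (PySem.List.pyGetD permu i 0 < 0 ∧ 0 ≤ y) ∨ (y < 0 ∧ 0 ≤ PySem.List.pyGetD permu i 0) then
          js ++ (((PySem.List.pyRange 0 length 1).foldl
              (fun d j => d.modify (PySem.List.pyGetD permu j 0) [] (fun l => l ++ [j]))
              PySem.Dict.empty).getD y []).filter (fun j => decide (i < j))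
        else js) [])
      (fun j => j) false
      = (PySem.List.pyRange (i + 1) length 1).filter
          (fun j => decide (pvCond (PySem.List.pyGetD permu i 0) (PySem.List.pyGetD permu j 0))) by
    rw [hs]
  apply PySem.List.sorted_eq_of_perm_of_pairwise_lt
  · -- permutation: split A's condition by the two candidate partner values
    simp only [List.foldl_cons, List.foldl_nil, hpos, hcut, List.nil_append]
    by_cases hg1 : (PySem.List.pyGetD permu i 0 < 0 ∧ 0 ≤ 1 - PySem.List.pyGetD permu i 0) ∨
        (1 - PySem.List.pyGetD permu i 0 < 0 ∧ 0 ≤ PySem.List.pyGetD permu i 0) <;>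
      by_cases hg2 : (PySem.List.pyGetD permu i 0 < 0 ∧ 0 ≤ -1 - PySem.List.pyGetD permu i 0) ∨
        (-1 - PySem.List.pyGetD permu i 0 < 0 ∧ 0 ≤ PySem.List.pyGetD permu i 0)
    · -- both candidate values pass the sign guard
      rw [if_pos hg1, if_pos hg2]
      have hfe : (PySem.List.pyRange (i + 1) length 1).filter
            (fun j => decide (pvCond (PySem.List.pyGetD permu i 0) (PySem.List.pyGetD permu j 0)))
          = (PySem.List.pyRange (i + 1) length 1).filter
            (fun j => decide (PySem.List.pyGetD permu j 0 = 1 - PySem.List.pyGetD permu i 0) ||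
                      decide (PySem.List.pyGetD permu j 0 = -1 - PySem.List.pyGetD permu i 0)) := by
        refine List.filter_congr (fun j _ => ?_)
        have hiff : pvCond (PySem.List.pyGetD permu i 0) (PySem.List.pyGetD permu j 0) ↔
            (PySem.List.pyGetD permu j 0 = 1 - PySem.List.pyGetD permu i 0 ∨
             PySem.List.pyGetD permu j 0 = -1 - PySem.List.pyGetD permu i 0) := by
          rw [pvCond_iff]; unfold pvGuard; tauto
        rw [decide_eq_decide.mpr hiff, Bool.decide_or]
      rw [hfe]
      refine pvFilter_or_perm _ _ _ (fun j _ => ?_)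
      simp only [decide_eq_true_eq]
      rintro ⟨ha, hb⟩
      omega
    · -- only 1-x passes the guard
      rw [if_pos hg1, if_neg hg2]
      have hfe : (PySem.List.pyRange (i + 1) length 1).filter
            (fun j => decide (pvCond (PySem.List.pyGetD permu i 0) (PySem.List.pyGetD permu j 0)))
          = (PySem.List.pyRange (i + 1) length 1).filter
            (fun j => decide (PySem.List.pyGetD permu j 0 = 1 - PySem.List.pyGetD permu i 0)) := by
        refine List.filter_congr (fun j _ => ?_)
        refine decide_eq_decide.mpr ?_
        rw [pvCond_iff]; unfold pvGuard; tauto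
      rw [hfe]
    · -- only -1-x passes the guard
      rw [if_neg hg1, if_pos hg2]
      have hfe : (PySem.List.pyRange (i + 1) length 1).filter
            (fun j => decide (pvCond (PySem.List.pyGetD permu i 0) (PySem.List.pyGetD permu j 0)))
          = (PySem.List.pyRange (i + 1) length 1).filter
            (fun j => decide (PySem.List.pyGetD permu j 0 = -1 - PySem.List.pyGetD permu i 0)) := by
        refine List.filter_congr (fun j _ => ?_)
        refine decide_eq_decide.mpr ?_
        rw [pvCond_iff]; unfold pvGuard; tauto
      rw [hfe, List.nil_append]
    · -- neither passes: no partners at all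
      rw [if_neg hg1, if_neg hg2]
      have hfe : (PySem.List.pyRange (i + 1) length 1).filter
          (fun j => decide (pvCond (PySem.List.pyGetD permu i 0) (PySem.List.pyGetD permu j 0))) = [] := by
        refine List.filter_eq_nil_iff.mpr (fun j _ => ?_)
        simp only [decide_eq_true_eq]
        rw [pvCond_iff]; unfold pvGuard; tauto
      rw [hfe]
  · exact (PySem.List.pairwise_lt_pyRange_one _ _).filter _

-- ===== VERDICT (by name: the statement is the Claim_ definition above) =====
theorem getOPList_spec : Claim_equal_getOPList := by
  intro length permu _ _
  exact pvMain length permu
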